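-- pv_equiv track=rewrite | github.com/DragunWF/Competitive-Programming | CodeWars/python/7_kyu/capitals_first.py | capitals_first
-- ===== SOURCE A (Python) =====
-- def capitals_first(text: str) -> str:
--     lowercase_words = []
--     capitalized_words = []
--     for word in text.split(" "):
--         if not word[0].isalpha():
--             continue
--         elif word[0] == word[0].upper():
--             capitalized_words.append(word)
--         else:
--             lowercase_words.append(word)
--     return f'{" ".join(capitalized_words)} {" ".join(lowercase_words)}'.strip()
-- ===== SOURCE B (Python) =====
-- def capitals_first(text: str) -> str:
--     words = [w for w in text.split(' ') if w[0].isalpha()]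
--     words.sort(key=lambda w: w[0] != w[0].upper())
--     return ' '.join(words).strip()
-- ===== Notes on version B (the rewrite author's own statement) =====
-- stated objective: simpler
-- what changed: A's explicit loop appending into two accumulator lists that are then joined and glued is replaced by one filtering comprehension plus an in-place stable sort on the binary key w[0] != w[0].upper(), which puts capitalized words first while preserving order within each class.
-- outside the precondition, e.g. on capitals_first(' '): A raises IndexError, B raises IndexError
import Mathlib
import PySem

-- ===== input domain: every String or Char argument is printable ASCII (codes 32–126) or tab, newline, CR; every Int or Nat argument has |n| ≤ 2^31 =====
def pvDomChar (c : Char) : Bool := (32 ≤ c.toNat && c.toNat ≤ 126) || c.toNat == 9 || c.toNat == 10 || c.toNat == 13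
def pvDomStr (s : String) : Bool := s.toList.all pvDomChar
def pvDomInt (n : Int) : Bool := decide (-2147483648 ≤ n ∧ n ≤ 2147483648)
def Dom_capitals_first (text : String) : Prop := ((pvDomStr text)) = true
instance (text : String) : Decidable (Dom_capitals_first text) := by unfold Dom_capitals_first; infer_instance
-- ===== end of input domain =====

-- B replaces A's two accumulator lists by one comprehension plus a stable sort on a
-- binary key (capitalized words first); objective: simpler.

-- ===== PORT A =====
def capitals_first (text : String) : String :=
  let st := ((PySem.Str.split? text " ").getD []).foldl
    (fun (st : List String × List String) word =>
      match PySem.Str.pyGet? word 0 with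
      | none => st  -- word[0] raises IndexError on an empty word; Pre_ excludes these inputs
      | some c =>
        if ¬ PySem.Chars.isalpha c then st
        else if c = PySem.Chars.upperChar c then (st.1, st.2 ++ [word])
        else (st.1 ++ [word], st.2)) ([], [])
  PySem.Str.strip (PySem.Str.join " " [PySem.Str.join " " st.2, PySem.Str.join " " st.1])

-- ===== PORT B =====
-- the comprehension's guard: w[0].isalpha()  (false = the word is dropped)
def pvFirstAlpha (w : String) : Bool :=
  match PySem.Str.pyGet? w 0 with
  | some c => PySem.Chars.isalpha c
  | none => false

-- the sort key: w[0] != w[0].upper()  (false sorts first = capitalized words first)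
def pvKeyLower (w : String) : Bool :=
  match PySem.Str.pyGet? w 0 with
  | some c => decide (c ≠ PySem.Chars.upperChar c)
  | none => false

def capitals_first_alt (text : String) : String :=
  let words := ((PySem.Str.split? text " ").getD []).filter pvFirstAlpha
  PySem.Str.strip (PySem.Str.join " " (PySem.List.sorted words pvKeyLower))

-- ===== PRECONDITION & SPEC =====
-- Pre_ excludes exactly the texts whose split on " " contains an empty word (leading or
-- trailing space, doubled spaces, the empty text): there word[0] raises IndexError in A
-- (and w[0] raises in B too).
def Pre_capitals_first (text : String) : Prop :=
  "" ∉ (PySem.Str.split? text " ").getD []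
instance (text : String) : Decidable (Pre_capitals_first text) := by
  unfold Pre_capitals_first; infer_instance

def pvWitness_capitals_first : String := "hey You there Bob 4x ok"

def Spec_capitals_first (text : String) (out : String) : Prop := out = capitals_first_alt text
instance (text : String) (out : String) : Decidable (Spec_capitals_first text out) := by unfold Spec_capitals_first; infer_instance

-- ===== CLAIM (what is proved, stated in full; the proofs are below) =====
def Claim_equal_capitals_first : Prop := ∀ (text : String), Dom_capitals_first text → Pre_capitals_first text → Spec_capitals_first text (capitals_first text)

-- ===== LEMMAS AND PROOFS =====

-- insertion of a false-key element goes after all false keys, before all true keys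
lemma pvInsertBy_false (k : String → Bool) (x : String) (hx : k x = false) :
    ∀ (F T : List String), (∀ y ∈ F, k y = false) → (∀ y ∈ T, k y = true) →
      PySem.List.insertBy (fun a b => decide (k a < k b)) x (F ++ T) = F ++ x :: T := by
  intro F
  induction F with
  | nil =>
    intro T _ hT
    cases T with
    | nil => simp [PySem.List.insertBy]
    | cons t ts =>
      have := hT t (by simp)
      simp [PySem.List.insertBy, hx, this]
  | cons f fs ih =>
    intro T hF hT
    have hf : k f = false := hF f (by simp)
    simp only [List.cons_append, PySem.List.insertBy, hx, hf]
    simp [ih T (fun y hy => hF y (by simp [hy])) hT]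

-- insertion of a true-key element goes at the very end
lemma pvInsertBy_true (k : String → Bool) (x : String) (hx : k x = true) :
    ∀ (L : List String),
      PySem.List.insertBy (fun a b => decide (k a < k b)) x L = L ++ [x] := by
  intro L
  induction L with
  | nil => simp [PySem.List.insertBy]
  | cons y ys ih => simp [PySem.List.insertBy, hx, ih]

-- the insertion-sort fold partitions: false keys (in order) before true keys (in order)
lemma pvFoldl_insertBy_partition (k : String → Bool) :
    ∀ (l F T : List String), (∀ y ∈ F, k y = false) → (∀ y ∈ T, k y = true) →
      l.foldl (fun acc x => PySem.List.insertBy (fun a b => decide (k a < k b)) x acc) (F ++ T)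
        = F ++ l.filter (fun x => !k x) ++ (T ++ l.filter k) := by
  intro l
  induction l with
  | nil => intro F T _ _; simp
  | cons x xs ih =>
    intro F T hF hT
    simp only [List.foldl_cons]
    cases hx : k x with
    | false =>
      rw [pvInsertBy_false k x hx F T hF hT]
      have hF' : ∀ y ∈ F ++ [x], k y = false := by
        intro y hy
        rcases List.mem_append.1 hy with h | h
        · exact hF y h
        · simp at h; subst h; exact hx
      have : F ++ x :: T = (F ++ [x]) ++ T := by simp
      rw [this, ih (F ++ [x]) T hF' hT]
      simp [hx, List.append_assoc]
    | true =>
      rw [pvInsertBy_true k x hx (F ++ T), List.append_assoc]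
      have hT' : ∀ y ∈ T ++ [x], k y = true := by
        intro y hy
        rcases List.mem_append.1 hy with h | h
        · exact hT y h
        · simp at h; subst h; exact hx
      rw [ih F (T ++ [x]) hF hT']
      simp [hx, List.append_assoc]

-- a stable sort on a Bool key IS the two-bucket partition
lemma pvSorted_bool_key (k : String → Bool) (l : List String) :
    PySem.List.sorted l k = l.filter (fun x => !k x) ++ l.filter k := by
  rw [PySem.List.sorted_eq_foldl_insertBy]
  have := pvFoldl_insertBy_partition k l [] [] (by simp) (by simp)
  simpa using this

-- A's loop builds exactly the two filtered lists
lemma pvFoldA : ∀ (ws l1 l2 : List String),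
    ws.foldl (fun (st : List String × List String) word =>
        match PySem.Str.pyGet? word 0 with
        | none => st
        | some c =>
          if ¬ PySem.Chars.isalpha c then st
          else if c = PySem.Chars.upperChar c then (st.1, st.2 ++ [word])
          else (st.1 ++ [word], st.2)) (l1, l2)
      = (l1 ++ ws.filter (fun w => pvFirstAlpha w && pvKeyLower w),
         l2 ++ ws.filter (fun w => pvFirstAlpha w && !pvKeyLower w)) := by
  intro ws
  induction ws with
  | nil => intro l1 l2; simp
  | cons w ws ih =>
    intro l1 l2
    rw [List.foldl_cons, List.filter_cons, List.filter_cons]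
    cases h : PySem.Str.pyGet? w 0 with
    | none =>
      have h' : PySem.List.pyGet? w.toList 0 = none := by simpa using h
      have hP : pvFirstAlpha w = false := by simp [pvFirstAlpha, h']
      simp only [hP]
      simpa using ih l1 l2
    | some c =>
      have h' : PySem.List.pyGet? w.toList 0 = some c := by simpa using h
      simp only []
      by_cases ha : PySem.Chars.isalpha c = true
      · have hP : pvFirstAlpha w = true := by simp [pvFirstAlpha, h', ha]
        by_cases hu : c = PySem.Chars.upperChar c
        · have hK : pvKeyLower w = false := by
            simp [pvKeyLower, h']
            simpa using hu
          rw [if_neg (not_not_intro ha), if_pos hu]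
          rw [ih l1 (l2 ++ [w])]
          simp [hP, hK, List.append_assoc]
        · have hK : pvKeyLower w = true := by
            simp [pvKeyLower, h']
            simpa using hu
          rw [if_neg (not_not_intro ha), if_neg hu]
          rw [ih (l1 ++ [w]) l2]
          simp [hP, hK, List.append_assoc]
      · have hP : pvFirstAlpha w = false := by simp [pvFirstAlpha, h', ha]
        rw [if_pos ha]
        simp only [hP]
        simpa using ih l1 l2

lemma pvStrip_cons_space (s : List Char) :
    PySem.Chars.strip (' ' :: s) = PySem.Chars.strip s := by
  simp [PySem.Chars.strip, PySem.Chars.lstrip, PySem.Chars.isspace]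

lemma pvRstrip_append_space (s : List Char) :
    PySem.Chars.rstrip (s ++ [' ']) = PySem.Chars.rstrip s := by
  simp [PySem.Chars.rstrip, PySem.Chars.isspace]

lemma pvStrip_append_space (s : List Char) :
    PySem.Chars.strip (s ++ [' ']) = PySem.Chars.strip s := by
  induction s with
  | nil => decide
  | cons a s ih =>
    by_cases ha : PySem.Chars.isspace a = true
    · simpa [PySem.Chars.strip, PySem.Chars.lstrip, ha] using ih
    · simp [PySem.Chars.strip, PySem.Chars.lstrip, ha]
      exact pvRstrip_append_space (a :: s)

lemma pvJoin_append (sep : List Char) (c : List Char) (cs : List (List Char)) (l : List Char) (ls : List (List Char)) :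
    PySem.Chars.join sep ((c :: cs) ++ (l :: ls))
      = PySem.Chars.join sep (c :: cs) ++ sep ++ PySem.Chars.join sep (l :: ls) := by
  induction cs generalizing c with
  | nil => simp [PySem.Chars.join_cons_cons]
  | cons c2 cs ih =>
    simp only [List.cons_append, PySem.Chars.join_cons_cons]
    have h := ih c2
    simp only [List.cons_append] at h
    rw [h]
    simp [List.append_assoc]

-- gluing the two joined buckets with one space = joining the concatenation (after strip)
lemma pvJoin_glue (caps lows : List (List Char)) :
    PySem.Chars.strip (PySem.Chars.join [' ']
        [PySem.Chars.join [' '] caps, PySem.Chars.join [' '] lows])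
      = PySem.Chars.strip (PySem.Chars.join [' '] (caps ++ lows)) := by
  rw [PySem.Chars.join_cons_cons]
  cases caps with
  | nil =>
    cases lows with
    | nil => decide
    | cons l ls =>
      simp [PySem.Chars.join_nil]
      exact pvStrip_cons_space _
  | cons c cs =>
    cases lows with
    | nil =>
      simp [PySem.Chars.join_nil]
      exact pvStrip_append_space _
    | cons l ls =>
      rw [pvJoin_append, PySem.Chars.join_singleton]

-- the same fact lifted to Strings
lemma pvStrGlue (caps lows : List String) :
    PySem.Str.strip (PySem.Str.join " " [PySem.Str.join " " caps, PySem.Str.join " " lows])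
      = PySem.Str.strip (PySem.Str.join " " (caps ++ lows)) := by
  apply String.toList_inj.mp
  rw [PySem.Str.toList_strip, PySem.Str.toList_strip, PySem.Str.toList_join, PySem.Str.toList_join]
  simp only [List.map_cons, List.map_nil, PySem.Str.toList_join, List.map_append]
  have hsep : " ".toList = [' '] := rfl
  rw [hsep]
  exact pvJoin_glue _ _

-- ===== VERDICT (by name: the statement is the Claim_ definition above) =====
theorem capitals_first_spec : Claim_equal_capitals_first := by
  intro text _ _
  show capitals_first text = capitals_first_alt text
  simp only [capitals_first, capitals_first_alt]
  rw [pvFoldA, pvSorted_bool_key, List.filter_filter, List.filter_filter]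
  have h1 : (((PySem.Str.split? text " ").getD []).filter
      (fun a => (!pvKeyLower a) && pvFirstAlpha a))
      = ((PySem.Str.split? text " ").getD []).filter (fun w => pvFirstAlpha w && !pvKeyLower w) :=
    List.filter_congr (fun x _ => by rw [Bool.and_comm])
  have h2 : (((PySem.Str.split? text " ").getD []).filter
      (fun a => pvKeyLower a && pvFirstAlpha a))
      = ((PySem.Str.split? text " ").getD []).filter (fun w => pvFirstAlpha w && pvKeyLower w) :=
    List.filter_congr (fun x _ => by rw [Bool.and_comm])
  rw [h1, h2]
  simpa using pvStrGlue
    (((PySem.Str.split? text " ").getD []).filter (fun w => pvFirstAlpha w && !pvKeyLower w))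
    (((PySem.Str.split? text " ").getD []).filter (fun w => pvFirstAlpha w && pvKeyLower w))
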